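-- pv_equiv track=rewrite | github.com/Verifier4UP/Trace-Refinement-based-Verification | Verifier4UP/src/Coherence/auxiliary.py | IsSuperterm
-- ===== SOURCE A (Python) =====
-- import copy
--
-- def IsSuperterm(Function, term, var):
--
--     # direct judgement
--     if var in term:
--         flag = True
--     # indirect judgement
--     else:
--         flag = False
--         candidate = []                  # term
--         candidate_vars = []             # term's variable
--         previous_candidate_vars_list = []
--         # find the superterm of first layer's variable
--         for fun in Function.keys():
--             if var in fun[fun.find("(")+1: fun.rfind(")")].split(", ") and Function[fun] != "undef":
--                 candidate.append(fun)
--                 candidate_vars.append(Function[fun])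
--
--
--         # find superterm layer by layer
--         while len(candidate) != 0:
--             if term in candidate:
--                 flag = True
--                 break
--             else:
--                 if set(candidate_vars) in previous_candidate_vars_list:       # Prevent falling into an endless loop
--                     break
--                 else:
--                     previous_candidate_vars_list.append(set(candidate_vars))
--                 previous_candidate_vars = list(set(copy.deepcopy(candidate_vars)))  # Deduplication
--                 candidate = []          # term
--                 candidate_vars = []     # term's variable
--                 for candidate_var in previous_candidate_vars:
--                     for fun in Function.keys():
--                         if candidate_var in fun[fun.find("(")+1: fun.rfind(")")].split(", "):
--                             candidate.append(fun)
--                             if Function[fun] != "undef":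
--                                 candidate_vars.append(Function[fun])
--     return flag
-- ===== SOURCE B (Python) =====
-- def IsSuperterm(Function, term, var):
--     # B: parse each key's argument list once, then saturate the set of reachable
--     # defined values monotonically (no per-layer reparsing, no history of sets).
--     if var in term:
--         return True
--     arglists = {f: f[f.find("(") + 1: f.rfind(")")].split(", ") for f in Function}
--     if term in arglists and var in arglists[term] and Function[term] != "undef":
--         return True
--
--     def step(S):
--         return {Function[f] for f in Function
--                 if Function[f] != "undef" and any(v in S for v in arglists[f])}
--
--     reach = step({var})
--     for _ in range(len(Function)):
--         new = step(reach)
--         if new <= reach: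
--             break
--         reach |= new
--     return term in arglists and any(v in arglists[term] for v in reach)
-- ===== Notes on version B (the rewrite author's own statement) =====
-- stated objective: alternative
-- what changed: B parses each key's argument list once into a dict and computes reachability by monotone saturation of a single growing set of reachable defined values (a fixpoint loop bounded by len(Function) rounds), instead of A's layer-by-layer recomputation that reparses every key on every layer, rebuilds candidate lists with duplicates, and detects cycles by keeping the history of all previous variable sets; B trades A's history-based cycle detection for monotonicity, so it needs no deepcopy, no dedup pass and no set history.
import Mathlib
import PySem

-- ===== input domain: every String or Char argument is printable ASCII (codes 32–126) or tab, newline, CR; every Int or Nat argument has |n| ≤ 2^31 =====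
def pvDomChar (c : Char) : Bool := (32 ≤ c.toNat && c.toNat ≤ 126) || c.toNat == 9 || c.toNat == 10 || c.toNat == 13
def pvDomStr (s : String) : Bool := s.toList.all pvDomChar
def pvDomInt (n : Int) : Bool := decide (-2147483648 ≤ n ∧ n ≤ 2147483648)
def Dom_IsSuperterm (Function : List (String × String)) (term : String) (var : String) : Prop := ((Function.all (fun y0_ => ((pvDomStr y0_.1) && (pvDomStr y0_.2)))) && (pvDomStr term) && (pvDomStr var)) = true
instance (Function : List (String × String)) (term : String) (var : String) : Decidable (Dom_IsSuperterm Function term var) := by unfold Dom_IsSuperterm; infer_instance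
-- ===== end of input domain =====

-- B replaces A's layer-by-layer recomputation (reparsing every key's argument list on
-- every layer and keeping a history of variable sets for cycle detection) by a single
-- parse of each key plus a monotone saturation of the set of reachable defined values.

-- shared parsing/lookup helpers (both Pythons contain these identical expressions)
-- fun[fun.find("(")+1 : fun.rfind(")")].split(", ")
def pvArgs (f : String) : List String :=
  (PySem.Str.split? (PySem.Str.slice f (some (PySem.Str.find f "(" + 1)) (some (PySem.Str.rfind f ")"))) ", ").getD []

def pvKeys (Function : List (String × String)) : List String :=
  PySem.Dict.keys (PySem.Dict.mk Function)

def pvVal (Function : List (String × String)) (f : String) : String :=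
  (PySem.Dict.get? (PySem.Dict.mk Function) f).getD ""

-- ===== PORT A =====
-- A's while-loop; fuel is a bound on the number of iterations (the loop appends a new
-- distinct subset of the value universe to `prev` each round, so 2^(#keys)+1 iterations
-- can never be reached; the fuel = 0 branch is proved unreachable below).
def IsSupertermLoop (Function : List (String × String)) (term : String) :
    Nat → List String → List String → List (Finset String) → Bool
  | 0, _, _, _ => false
  | fuel+1, cand, cvars, prev =>
    if cand.isEmpty then false                         -- while len(candidate) != 0
    else if cand.contains term then true               -- if term in candidate
    else if cvars.toFinset ∈ prev then false           -- if set(candidate_vars) in previous_…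
    else
      let pv := PySem.List.dedup cvars                 -- list(set(candidate_vars)) (distinct elements; order irrelevant to the bool result)
      let cand' := pv.flatMap (fun v =>
        (pvKeys Function).filter (fun f => (pvArgs f).contains v))
      let cvars' := pv.flatMap (fun v =>
        ((pvKeys Function).filter (fun f =>
          (pvArgs f).contains v && pvVal Function f != "undef")).map (pvVal Function))
      IsSupertermLoop Function term fuel cand' cvars' (prev ++ [cvars.toFinset])

def IsSuperterm (Function : List (String × String)) (term : String) (var : String) : Bool :=
  if PySem.Str.isIn var term then true                 -- if var in term
  else
    let cand := (pvKeys Function).filter (fun f =>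
      (pvArgs f).contains var && pvVal Function f != "undef")
    let cvars := cand.map (pvVal Function)
    IsSupertermLoop Function term (2 ^ (pvKeys Function).length + 1) cand cvars []

-- ===== PORT B =====
-- values of keys mentioning a variable of S (Python's helper `step`)
def pvStep (Function : List (String × String)) (S : Finset String) : Finset String :=
  (((pvKeys Function).filter (fun f =>
    pvVal Function f != "undef" && (pvArgs f).any (fun v => decide (v ∈ S)))).map
      (pvVal Function)).toFinset

def pvSatLoop (Function : List (String × String)) : Nat → Finset String → Finset String
  | 0, S => S
  | n+1, S =>
    let new := pvStep Function S
    if new ⊆ S then S else pvSatLoop Function n (S ∪ new)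

def IsSuperterm_alt (Function : List (String × String)) (term : String) (var : String) : Bool :=
  if PySem.Str.isIn var term then true
  else if (pvKeys Function).contains term && (pvArgs term).contains var
          && pvVal Function term != "undef" then true
  else
    let reach := pvSatLoop Function (pvKeys Function).length (pvStep Function {var})
    (pvKeys Function).contains term && (pvArgs term).any (fun v => decide (v ∈ reach))

-- ===== PRECONDITION & SPEC =====
def Spec_IsSuperterm (Function : List (String × String)) (term : String) (var : String) (out : Bool) : Prop := out = IsSuperterm_alt Function term var
instance (Function : List (String × String)) (term : String) (var : String) (out : Bool) : Decidable (Spec_IsSuperterm Function term var out) := by unfold Spec_IsSuperterm; infer_instance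

-- ===== CLAIM (what is proved, stated in full; the proofs are below) =====
def Claim_equal_IsSuperterm : Prop := ∀ (Function : List (String × String)) (term : String) (var : String), Dom_IsSuperterm Function term var → Spec_IsSuperterm Function term var (IsSuperterm Function term var)

-- ===== LEMMAS AND PROOFS =====

-- layer sequence of A's loop: sets of candidate variables
def pvVseq (F : List (String × String)) (var : String) : Nat → Finset String
  | 0 => pvStep F {var}
  | k+1 => pvStep F (pvVseq F var k)

-- "term is in A's candidate list of layer k"
def pvHead (F : List (String × String)) (term var : String) : Nat → Prop
  | 0 => term ∈ pvKeys F ∧ var ∈ pvArgs term ∧ pvVal F term ≠ "undef"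
  | k+1 => term ∈ pvKeys F ∧ ∃ v ∈ pvVseq F var k, v ∈ pvArgs term

-- universe of values A/B can ever reach
def pvW (F : List (String × String)) : Finset String :=
  (((pvKeys F).filter (fun f => pvVal F f != "undef")).map (pvVal F)).toFinset

lemma mem_pvStep {F : List (String × String)} {S : Finset String} {x : String} :
    x ∈ pvStep F S ↔ ∃ f ∈ pvKeys F, pvVal F f ≠ "undef" ∧ (∃ v ∈ pvArgs f, v ∈ S) ∧ pvVal F f = x := by
  simp only [pvStep, List.mem_toFinset, List.mem_map, List.mem_filter, Bool.and_eq_true,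
    bne_iff_ne, ne_eq, List.any_eq_true, decide_eq_true_eq]
  constructor
  · rintro ⟨f, ⟨hf, hu, hv⟩, hx⟩
    exact ⟨f, hf, hu, hv, hx⟩
  · rintro ⟨f, hf, hu, hv, hx⟩
    exact ⟨f, ⟨hf, hu, hv⟩, hx⟩

lemma pvStep_subset_W (F : List (String × String)) (S : Finset String) :
    pvStep F S ⊆ pvW F := by
  intro x hx
  rw [mem_pvStep] at hx
  rcases hx with ⟨f, hf, hu, _, hv⟩
  simp only [pvW, List.mem_toFinset, List.mem_map, List.mem_filter, bne_iff_ne, ne_eq]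
  exact ⟨f, ⟨hf, hu⟩, hv⟩

lemma pvStep_mono {F : List (String × String)} {S T : Finset String} (h : S ⊆ T) :
    pvStep F S ⊆ pvStep F T := by
  intro x hx
  rw [mem_pvStep] at hx ⊢
  rcases hx with ⟨f, hf, hu, ⟨v, hv1, hv2⟩, hx⟩
  exact ⟨f, hf, hu, ⟨v, hv1, h hv2⟩, hx⟩

lemma pvStep_empty (F : List (String × String)) : pvStep F ∅ = ∅ := by
  ext x
  rw [mem_pvStep]
  simp

-- the saturation loop without its (no-op) early break
def pvChain (F : List (String × String)) : Nat → Finset String → Finset String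
  | 0, S => S
  | n+1, S => pvChain F n (S ∪ pvStep F S)

lemma pvChain_fix {F : List (String × String)} {S : Finset String}
    (h : pvStep F S ⊆ S) : ∀ n, pvChain F n S = S := by
  intro n
  induction n with
  | zero => rfl
  | succ n ih =>
    show pvChain F n (S ∪ pvStep F S) = S
    rw [Finset.union_eq_left.mpr h]
    exact ih

lemma pvSatLoop_eq_chain (F : List (String × String)) :
    ∀ n S, pvSatLoop F n S = pvChain F n S := by
  intro n
  induction n with
  | zero => intro S; rfl
  | succ n ih =>
    intro S
    show (if pvStep F S ⊆ S then S else pvSatLoop F n (S ∪ pvStep F S)) = pvChain F n (S ∪ pvStep F S)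
    by_cases h : pvStep F S ⊆ S
    · rw [if_pos h, Finset.union_eq_left.mpr h, pvChain_fix h]
    · rw [if_neg h, ih]

lemma pvChain_succ (F : List (String × String)) :
    ∀ (n : Nat) (S : Finset String),
      pvChain F (n+1) S = pvChain F n S ∪ pvStep F (pvChain F n S) := by
  intro n
  induction n with
  | zero => intro S; rfl
  | succ n ih =>
    intro S
    show pvChain F (n+1) (S ∪ pvStep F S) = _
    rw [ih]
    rfl

lemma subset_pvChain (F : List (String × String)) :
    ∀ (n : Nat) (S : Finset String), S ⊆ pvChain F n S := by
  intro n
  induction n with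
  | zero => intro S; exact Finset.Subset.refl S
  | succ n ih =>
    intro S
    exact Finset.Subset.trans Finset.subset_union_left (ih (S ∪ pvStep F S))

lemma pvChain_subset_W {F : List (String × String)} :
    ∀ (n : Nat) {S : Finset String}, S ⊆ pvW F → pvChain F n S ⊆ pvW F := by
  intro n
  induction n with
  | zero => intro S h; exact h
  | succ n ih =>
    intro S h
    exact ih (Finset.union_subset h (pvStep_subset_W F S))

lemma pv_cardW_le (F : List (String × String)) : (pvW F).card ≤ (pvKeys F).length :=
  le_trans (List.toFinset_card_le _)
    (by rw [List.length_map]; exact List.length_filter_le _ _)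

-- saturation after #keys rounds
lemma pvChain_sat (F : List (String × String)) {S : Finset String} (hS : S ⊆ pvW F) :
    pvStep F (pvChain F (pvKeys F).length S) ⊆ pvChain F (pvKeys F).length S := by
  set N := (pvKeys F).length with hN
  by_cases hex : ∃ j, j < N ∧ pvStep F (pvChain F j S) ⊆ pvChain F j S
  · rcases hex with ⟨j, hj, hfix⟩
    have stable : ∀ d, pvChain F (j + d) S = pvChain F j S := by
      intro d
      induction d with
      | zero => rfl
      | succ d ih =>
        rw [show j + (d+1) = (j+d) + 1 by omega, pvChain_succ, ih,
          Finset.union_eq_left.mpr hfix]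
    have : pvChain F N S = pvChain F j S := by
      rw [show N = j + (N - j) by omega, stable]
    rw [this]
    exact hfix
  · simp only [not_exists, not_and] at hex
    have grow : ∀ j, j ≤ N → j ≤ (pvChain F j S).card := by
      intro j
      induction j with
      | zero => intro _; exact Nat.zero_le _
      | succ j ih =>
        intro hj
        have hlt : pvChain F j S ⊂ pvChain F j S ∪ pvStep F (pvChain F j S) := by
          rcases Finset.not_subset.mp (hex j (by omega)) with ⟨x, hx1, hx2⟩
          exact Finset.ssubset_iff_of_subset Finset.subset_union_left |>.mpr
            ⟨x, Finset.mem_union_right _ hx1, hx2⟩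
        have := Finset.card_lt_card hlt
        rw [← pvChain_succ] at this
        have := ih (by omega)
        omega
    have h1 : N ≤ (pvChain F N S).card := grow N le_rfl
    have h2 : (pvChain F N S).card ≤ (pvW F).card :=
      Finset.card_le_card (pvChain_subset_W N hS)
    have h3 : (pvW F).card ≤ N := pv_cardW_le F
    have heq : pvChain F N S = pvW F :=
      Finset.eq_of_subset_of_card_le (pvChain_subset_W N hS) (by omega)
    rw [heq]
    exact pvStep_subset_W F _

-- remaining spec lemmas
lemma pvVseq_subset_W (F : List (String × String)) (var : String) :
    ∀ k, pvVseq F var k ⊆ pvW F := by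
  intro k; cases k <;> exact pvStep_subset_W F _

lemma pvVseq_empty {F : List (String × String)} {var : String} {k : Nat}
    (h : pvVseq F var k = ∅) : ∀ d, pvVseq F var (k + d) = ∅ := by
  intro d
  induction d with
  | zero => exact h
  | succ d ih =>
    show pvStep F (pvVseq F var (k + d)) = ∅
    rw [ih, pvStep_empty]

lemma mem_reach_iff (F : List (String × String)) (var : String) (x : String) :
    x ∈ pvChain F (pvKeys F).length (pvStep F {var}) ↔ ∃ k, x ∈ pvVseq F var k := by
  constructor
  · have aux : ∀ (j : Nat) (y : String), y ∈ pvChain F j (pvStep F {var}) →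
        ∃ k, y ∈ pvVseq F var k := by
      intro j
      induction j with
      | zero => intro y hy; exact ⟨0, hy⟩
      | succ j ih =>
        intro y hy
        rw [pvChain_succ] at hy
        rcases Finset.mem_union.mp hy with hy | hy
        · exact ih y hy
        · rcases mem_pvStep.mp hy with ⟨f, hf, hu, ⟨v, hv1, hv2⟩, hx⟩
          rcases ih v hv2 with ⟨k, hk⟩
          exact ⟨k + 1, mem_pvStep.mpr ⟨f, hf, hu, ⟨v, hv1, hk⟩, hx⟩⟩
    exact aux _ x
  · rintro ⟨k, hk⟩
    have sub : ∀ k, pvVseq F var k ⊆ pvChain F (pvKeys F).length (pvStep F {var}) := by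
      intro k
      induction k with
      | zero => exact subset_pvChain F _ _
      | succ k ih =>
        refine Finset.Subset.trans (pvStep_mono ih) ?_
        exact pvChain_sat F (pvStep_subset_W F _)
    exact sub k hk

lemma loopA_iff (F : List (String × String)) (term var : String) :
    ∀ (fuel : Nat) (cand cvars : List String) (prev : List (Finset String)) (k : Nat),
      cvars.toFinset = pvVseq F var k →
      (term ∈ cand ↔ pvHead F term var k) →
      (cand = [] → cvars = []) →
      prev = (List.range k).map (pvVseq F var) →
      (∀ i j, i < j → j < k → pvVseq F var i ≠ pvVseq F var j) →
      (∀ j < k, ¬ pvHead F term var j) →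
      2 ^ (pvW F).card + 1 ≤ fuel + k →
      (IsSupertermLoop F term fuel cand cvars prev = true ↔ ∃ m, pvHead F term var (k + m)) := by
  intro fuel
  induction fuel with
  | zero =>
    intro cand cvars prev k h1 h2 h3 h4 h5 h6 h7
    exfalso
    have himg : (Finset.range k).image (pvVseq F var) ⊆ (pvW F).powerset := by
      intro S hS
      rcases Finset.mem_image.mp hS with ⟨j, _, rfl⟩
      exact Finset.mem_powerset.mpr (pvVseq_subset_W F var j)
    have hcard : ((Finset.range k).image (pvVseq F var)).card = k := by
      rw [Finset.card_image_of_injOn, Finset.card_range]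
      intro i hi j hj hij
      rcases lt_trichotomy i j with h | h | h
      · exact absurd hij (h5 i j h (Finset.mem_range.mp hj))
      · exact h
      · exact absurd hij.symm (h5 j i h (Finset.mem_range.mp hi))
    have hle := Finset.card_le_card himg
    rw [hcard, Finset.card_powerset] at hle
    omega
  | succ fuel ih =>
    intro cand cvars prev k h1 h2 h3 h4 h5 h6 h7
    show (if cand.isEmpty then false
      else if cand.contains term then true
      else if cvars.toFinset ∈ prev then false
      else _) = true ↔ _
    by_cases hemp : cand = []
    · rw [if_pos (by simp [hemp])]
      have hcv : cvars = [] := h3 hemp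
      have hV : pvVseq F var k = ∅ := by rw [← h1, hcv]; rfl
      simp only [Bool.false_eq_true, false_iff, not_exists]
      intro m hm
      cases m with
      | zero => exact absurd (h2.mpr hm) (by simp [hemp])
      | succ m =>
        rcases hm with ⟨_, v, hv, _⟩
        have hv' : v ∈ pvVseq F var (k + m) := hv
        rw [pvVseq_empty hV m] at hv'
        exact absurd hv' (Finset.notMem_empty v)
    · rw [if_neg (by simp [hemp])]
      by_cases hmem : term ∈ cand
      · rw [if_pos (List.contains_iff_mem.mpr hmem)]
        simp only [true_iff]
        exact ⟨0, h2.mp hmem⟩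
      · rw [if_neg (fun hc => hmem (List.contains_iff_mem.mp hc))]
        by_cases hcyc : cvars.toFinset ∈ prev
        · rw [if_pos hcyc]
          rw [h1, h4] at hcyc
          rcases List.mem_map.mp hcyc with ⟨j, hjr, hjeq⟩
          have hj : j < k := List.mem_range.mp hjr
          have key : ∀ d, ∃ i, j ≤ i ∧ i < k ∧ pvVseq F var (j + d) = pvVseq F var i := by
            intro d
            induction d with
            | zero => exact ⟨j, le_rfl, hj, rfl⟩
            | succ d ihd =>
              rcases ihd with ⟨i, hi1, hi2, heq⟩
              have hstep : pvVseq F var (j + (d + 1)) = pvVseq F var (i + 1) := by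
                show pvStep F (pvVseq F var (j + d)) = pvStep F (pvVseq F var i)
                rw [heq]
              by_cases hik : i + 1 < k
              · exact ⟨i + 1, by omega, hik, hstep⟩
              · have hik' : i + 1 = k := by omega
                refine ⟨j, le_rfl, hj, ?_⟩
                rw [hstep, hik', ← hjeq]
          simp only [Bool.false_eq_true, false_iff, not_exists]
          intro m hm
          cases m with
          | zero => exact hmem (h2.mpr hm)
          | succ m =>
            rcases hm with ⟨ht, v, hv, hva⟩
            have hv' : v ∈ pvVseq F var (k + m) := hv
            rcases key (k - j + m) with ⟨i, hi1, hi2, heq⟩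
            rw [show j + (k - j + m) = k + m by omega] at heq
            rw [heq] at hv'
            have hhead : pvHead F term var (i + 1) := ⟨ht, v, hv', hva⟩
            by_cases hik : i + 1 < k
            · exact h6 (i + 1) hik hhead
            · have : i + 1 = k := by omega
              rw [this] at hhead
              exact hmem (h2.mpr hhead)
        · rw [if_neg hcyc]
          have hmemd : ∀ v, v ∈ PySem.List.dedup cvars ↔ v ∈ pvVseq F var k := by
            intro v
            rw [PySem.List.mem_dedup, ← h1, List.mem_toFinset]
          have h1' : (PySem.List.dedup cvars |>.flatMap (fun v =>
              ((pvKeys F).filter (fun f =>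
                (pvArgs f).contains v && pvVal F f != "undef")).map (pvVal F))).toFinset
              = pvVseq F var (k + 1) := by
            ext x
            show _ ↔ x ∈ pvStep F (pvVseq F var k)
            rw [mem_pvStep]
            simp only [List.mem_toFinset, List.mem_flatMap, List.mem_map, List.mem_filter,
              Bool.and_eq_true, bne_iff_ne, ne_eq, List.contains_iff_mem, hmemd]
            constructor
            · rintro ⟨v, hv, f, ⟨hf, hva, hu⟩, hx⟩
              exact ⟨f, hf, hu, ⟨v, hva, hv⟩, hx⟩
            · rintro ⟨f, hf, hu, ⟨v, hva, hv⟩, hx⟩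
              exact ⟨v, hv, f, ⟨hf, hva, hu⟩, hx⟩
          have h2' : term ∈ (PySem.List.dedup cvars |>.flatMap (fun v =>
              (pvKeys F).filter (fun f => (pvArgs f).contains v)))
              ↔ pvHead F term var (k + 1) := by
            show _ ↔ term ∈ pvKeys F ∧ ∃ v ∈ pvVseq F var k, v ∈ pvArgs term
            simp only [List.mem_flatMap, List.mem_filter, List.contains_iff_mem, hmemd]
            constructor
            · rintro ⟨v, hv, ht, hva⟩
              exact ⟨ht, v, hv, hva⟩
            · rintro ⟨ht, v, hv, hva⟩
              exact ⟨v, hv, ht, hva⟩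
          have h3' : (PySem.List.dedup cvars |>.flatMap (fun v =>
              (pvKeys F).filter (fun f => (pvArgs f).contains v))) = [] →
              (PySem.List.dedup cvars |>.flatMap (fun v =>
              ((pvKeys F).filter (fun f =>
                (pvArgs f).contains v && pvVal F f != "undef")).map (pvVal F))) = [] := by
            intro hnil
            rw [List.eq_nil_iff_forall_not_mem]
            intro x hx
            simp only [List.mem_flatMap, List.mem_map] at hx
            obtain ⟨v, hv, f, hfm, -⟩ := hx
            have hf := (List.mem_filter.mp hfm).1
            have hva : (pvArgs f).contains v = true :=
              ((Bool.and_eq_true _ _).mp (List.mem_filter.mp hfm).2).1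
            have : f ∈ (PySem.List.dedup cvars |>.flatMap (fun v =>
                (pvKeys F).filter (fun f => (pvArgs f).contains v))) :=
              List.mem_flatMap.mpr ⟨v, hv, List.mem_filter.mpr ⟨hf, hva⟩⟩
            rw [hnil] at this
            exact absurd this (List.not_mem_nil)
          have h4' : prev ++ [cvars.toFinset] = (List.range (k + 1)).map (pvVseq F var) := by
            rw [List.range_succ, List.map_append, ← h4, h1]
            rfl
          have h5' : ∀ i j, i < j → j < k + 1 → pvVseq F var i ≠ pvVseq F var j := by
            intro i j hij hjk
            by_cases hj : j < k
            · exact h5 i j hij hj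
            · have hj' : j = k := by omega
              subst hj'
              intro hne
              apply hcyc
              rw [h1, h4]
              exact List.mem_map.mpr ⟨i, List.mem_range.mpr hij, hne⟩
          have h6' : ∀ j < k + 1, ¬ pvHead F term var j := by
            intro j hj
            by_cases hjk : j < k
            · exact h6 j hjk
            · have : j = k := by omega
              subst this
              intro hh
              exact hmem (h2.mpr hh)
          have hrec := ih _ _ _ (k + 1) h1' h2' h3' h4' h5' h6' (by omega)
          rw [hrec]
          constructor
          · rintro ⟨m, hm⟩
            exact ⟨m + 1, by rw [show k + (m + 1) = k + 1 + m by omega]; exact hm⟩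
          · rintro ⟨m, hm⟩
            cases m with
            | zero => exact absurd hm (fun hh => hmem (h2.mpr hh))
            | succ m => exact ⟨m, by rw [show k + 1 + m = k + (m + 1) by omega]; exact hm⟩

theorem pvA_iff (F : List (String × String)) (term var : String) :
    IsSuperterm F term var = true ↔
      (PySem.Str.isIn var term = true ∨ ∃ m, pvHead F term var m) := by
  by_cases hsub : PySem.Str.isIn var term = true
  · show (if PySem.Str.isIn var term then true else _) = true ↔ _
    rw [if_pos hsub]
    exact iff_of_true rfl (Or.inl hsub)
  · show (if PySem.Str.isIn var term then true else _) = true ↔ _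
    rw [if_neg hsub]
    have h1 : (((pvKeys F).filter (fun f =>
        (pvArgs f).contains var && pvVal F f != "undef")).map (pvVal F)).toFinset
        = pvVseq F var 0 := by
      ext x
      show _ ↔ x ∈ pvStep F {var}
      rw [mem_pvStep]
      simp only [List.mem_toFinset, List.mem_map, List.mem_filter, Bool.and_eq_true,
        bne_iff_ne, ne_eq, List.contains_iff_mem, Finset.mem_singleton]
      constructor
      · rintro ⟨f, ⟨hf, hva, hu⟩, hx⟩
        exact ⟨f, hf, hu, ⟨var, hva, rfl⟩, hx⟩
      · rintro ⟨f, hf, hu, ⟨v, hva, rfl⟩, hx⟩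
        exact ⟨f, ⟨hf, hva, hu⟩, hx⟩
    have h2 : term ∈ (pvKeys F).filter (fun f =>
        (pvArgs f).contains var && pvVal F f != "undef") ↔ pvHead F term var 0 := by
      show _ ↔ term ∈ pvKeys F ∧ var ∈ pvArgs term ∧ pvVal F term ≠ "undef"
      simp only [List.mem_filter, Bool.and_eq_true, bne_iff_ne, ne_eq, List.contains_iff_mem]
    have hfuel : 2 ^ (pvW F).card + 1 ≤ (2 ^ (pvKeys F).length + 1) + 0 := by
      have := Nat.pow_le_pow_right (show 1 ≤ 2 by omega) (pv_cardW_le F)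
      omega
    have := loopA_iff F term var (2 ^ (pvKeys F).length + 1) _ _ [] 0 h1 h2
      (fun h => by rw [h, List.map_nil]) (by simp) (by omega) (by omega) hfuel
    rw [this]
    simp only [Nat.zero_add]
    exact (or_iff_right hsub).symm

set_option maxHeartbeats 1600000 in
theorem pvB_iff (F : List (String × String)) (term var : String) :
    IsSuperterm_alt F term var = true ↔
      (PySem.Str.isIn var term = true ∨ ∃ m, pvHead F term var m) := by
  have hcond : ((pvKeys F).contains term && (pvArgs term).contains var
      && pvVal F term != "undef") = true ↔ pvHead F term var 0 := by
    show _ ↔ term ∈ pvKeys F ∧ var ∈ pvArgs term ∧ pvVal F term ≠ "undef"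
    simp only [Bool.and_eq_true, bne_iff_ne, ne_eq, List.contains_iff_mem]
    exact and_assoc
  simp only [IsSuperterm_alt]
  by_cases hsub : PySem.Str.isIn var term = true
  · rw [if_pos hsub]
    exact iff_of_true rfl (Or.inl hsub)
  · rw [if_neg hsub]
    by_cases h0 : ((pvKeys F).contains term && (pvArgs term).contains var
        && pvVal F term != "undef") = true
    · rw [if_pos h0]
      simp only [true_iff]
      exact Or.inr ⟨0, hcond.mp h0⟩
    · rw [if_neg h0]
      rw [pvSatLoop_eq_chain]
      simp only [Bool.and_eq_true, List.contains_iff_mem, List.any_eq_true,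
        decide_eq_true_eq, mem_reach_iff]
      constructor
      · rintro ⟨ht, v, hva, kk, hk⟩
        exact Or.inr ⟨kk + 1, ht, v, hk, hva⟩
      · rintro (hsub' | ⟨m, hm⟩)
        · exact absurd hsub' hsub
        · cases m with
          | zero => exact absurd (hcond.mpr hm) h0
          | succ m =>
            rcases hm with ⟨ht, v, hv, hva⟩
            exact ⟨ht, v, hva, m, hv⟩

-- ===== VERDICT (by name: the statement is the Claim_ definition above) =====
theorem IsSuperterm_spec : Claim_equal_IsSuperterm := by
  intro F term var _
  unfold Spec_IsSuperterm
  have hAB : IsSuperterm F term var = true ↔ IsSuperterm_alt F term var = true :=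
    (pvA_iff F term var).trans (pvB_iff F term var).symm
  exact Bool.eq_iff_iff.mpr hAB
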